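-- pv_equiv track=rewrite | github.com/semone/advent-of-code-2020 | day16/day16.py | strip_dowm
-- ===== SOURCE A (Python) =====
-- def strip_dowm(v, taken):
--     cp = v
--
--     for key, val in v.items():
--         if len(val) == 1:
--             taken.append(val[0])
--         else:
--             j = list(filter(lambda y: y not in taken, val))
--             cp[key] = j
--
--     if any(len(x) > 1 for x in cp.values()):
--         return strip_dowm(cp, taken)
--     else:
--         return cp
-- ===== SOURCE B (Python) =====
-- def strip_dowm(v, taken):
--     # Iterative incremental elimination instead of A's recursive full re-filtering:
--     # keep one deduplicated log of eliminated values ('events'), a set for O(1)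
--     # membership, and per column a cursor 'seen' so each column is filtered only
--     # against the values that became eliminated since its last visit.
--     # (Return value only: unlike A, this mutates neither v nor taken.)
--     names = list(v)
--     cols = [list(val) for val in v.values()]
--     events = list(dict.fromkeys(taken))   # eliminated values, in first-activation order
--     member = set(events)
--     seen = [0] * len(cols)
--     while True:
--         pending = False
--         for i, c in enumerate(cols):
--             if len(c) == 1:
--                 x = c[0]
--                 if x not in member:       # a frozen column activates its value once
--                     member.add(x)
--                     events.append(x)
--             else:
--                 k = len(events)
--                 if seen[i] < k:           # only newly activated values can remove anything
--                     delta = set(events[seen[i]:])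
--                     cols[i] = c = [y for y in c if y not in delta]
--                     seen[i] = k
--                 if len(c) > 1:
--                     pending = True
--         if not pending:
--             return dict(zip(names, cols))
-- ===== Notes on version B (the rewrite author's own statement) =====
-- stated objective: alternative
-- what changed: A recursively re-runs full elimination passes, re-filtering every list against the whole ever-growing duplicate-ridden taken list; B is an iterative loop keeping a deduplicated event log plus a membership set and a per-column cursor, so each column is filtered only against the values eliminated since its last visit and frozen columns activate their value exactly once.
import Mathlib
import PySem

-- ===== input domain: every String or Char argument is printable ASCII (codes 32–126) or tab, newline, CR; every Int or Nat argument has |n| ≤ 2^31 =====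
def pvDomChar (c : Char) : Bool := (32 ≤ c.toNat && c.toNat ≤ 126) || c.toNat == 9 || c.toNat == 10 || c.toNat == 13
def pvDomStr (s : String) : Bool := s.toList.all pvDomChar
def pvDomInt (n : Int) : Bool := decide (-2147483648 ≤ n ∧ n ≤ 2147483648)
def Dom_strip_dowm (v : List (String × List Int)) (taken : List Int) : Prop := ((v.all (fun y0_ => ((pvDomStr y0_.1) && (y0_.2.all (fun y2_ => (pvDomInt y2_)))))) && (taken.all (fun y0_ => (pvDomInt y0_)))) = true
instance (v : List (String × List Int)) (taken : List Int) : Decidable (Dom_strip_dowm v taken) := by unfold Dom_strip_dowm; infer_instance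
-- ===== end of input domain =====

-- B replaces A's recursive full re-filtering rounds by an iterative loop with a deduplicated
-- event log, a set for membership and per-column cursors, so each column is only filtered
-- against newly eliminated values; equivalence is about the RETURN value only: A mutates v
-- and appends to taken in place, B mutates neither.

-- ===== PORT A =====
-- one iteration of A's `for key, val in v.items()` loop, threading the mutated `taken` list;
-- the dict is the association list itself; `val[0]` under the `len(val) == 1` guard is headI
def stripPass : List (String × List Int) → List Int → List (String × List Int) × List Int
  | [], taken => ([], taken)
  | (key, val) :: rest, taken =>
    if val.length = 1 then
      let r := stripPass rest (taken ++ [val.headI])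
      ((key, val) :: r.1, r.2)
    else
      let j := val.filter (fun y => !(taken.contains y))
      let r := stripPass rest taken
      ((key, j) :: r.1, r.2)

-- A's tail recursion `return strip_dowm(cp, taken)`; the fuel argument is only a totality
-- guard: every run of A that returns makes set-or-list progress in each round, so
-- 2*(sum of lengths) + (number of entries) + 4 rounds always suffice for such runs
def stripGo : Nat → List (String × List Int) → List Int → List (String × List Int)
  | 0, cp, _ => cp
  | fuel + 1, v, taken =>
    let r := stripPass v taken
    if r.1.any (fun x => 1 < x.2.length) then stripGo fuel r.1 r.2 else r.1

def strip_dowm (v : List (String × List Int)) (taken : List Int) : List (String × List Int) :=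
  stripGo (2 * (v.map (fun p => p.2.length)).sum + v.length + 4) v taken

-- ===== PORT B =====
-- Source B's inner `for i, c in enumerate(cols)` loop: threads (events, member, pending);
-- a frozen (length-1) column activates its value once, a longer column is filtered only
-- against the events appended since its cursor `s`
def altRound : List (List Int × Nat) → List Int → PySem.Set Int → Bool →
    List (List Int × Nat) × List Int × PySem.Set Int × Bool
  | [], events, member, pending => ([], events, member, pending)
  | (c, s) :: rest, events, member, pending =>
    if c.length = 1 then
      if PySem.Set.contains member c.headI then
        let r := altRound rest events member pending
        ((c, s) :: r.1, r.2)
      else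
        let r := altRound rest (events ++ [c.headI]) (PySem.Set.add member c.headI) pending
        ((c, s) :: r.1, r.2)
    else
      let c' := if s < events.length then c.filter (fun y => !((events.drop s).contains y)) else c
      let s' := if s < events.length then events.length else s
      let r := altRound rest events member (pending || decide (1 < c'.length))
      ((c', s') :: r.1, r.2)

-- Source B's `while True` loop; the fuel is only a totality guard (same bound as A's port)
def altGo : Nat → List (List Int × Nat) → List Int → PySem.Set Int → List (List Int)
  | 0, cols, _, _ => cols.map Prod.fst
  | fuel + 1, cols, events, member =>
    let r := altRound cols events member false
    if r.2.2.2 then altGo fuel r.1 r.2.1 r.2.2.1 else r.1.map Prod.fst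

-- names/cols split, events = list(dict.fromkeys(taken)), member = set(events), seen = [0]*n,
-- and the final dict(zip(names, cols))
def strip_dowm_alt (v : List (String × List Int)) (taken : List Int) : List (String × List Int) :=
  (v.map Prod.fst).zip
    (altGo (2 * (v.map (fun p => p.2.length)).sum + v.length + 4)
      (v.map (fun p => (p.2, 0)))
      (PySem.List.dedup taken)
      (PySem.Set.ofList (PySem.List.dedup taken)))

-- ===== PRECONDITION & SPEC =====
-- one elimination round, stated set-wise (E collects the eliminated values in activation
-- order): a length-1 entry activates its value, any other entry is filtered by E
def pvRound (st : List (String × List Int) × List Int) : List (String × List Int) × List Int :=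
  st.1.foldl
    (fun acc p =>
      if p.2.length = 1 then
        (acc.1 ++ [p], if p.2.headI ∈ acc.2 then acc.2 else acc.2 ++ [p.2.headI])
      else
        (acc.1 ++ [(p.1, p.2.filter (fun y => decide (y ∉ acc.2)))], acc.2))
    ([], st.2)

-- iterate pvRound, stopping early at a fixpoint (from which no further round changes anything)
def pvRun : Nat → List (String × List Int) × List Int → List (String × List Int) × List Int
  | 0, st => st
  | k + 1, st => if pvRound st = st then st else pvRun k (pvRound st)

-- Pre_ excludes exactly the inputs on which A recurses forever (Python: RecursionError):
-- A returns iff the round-based elimination reaches a table whose candidate lists all have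
-- length ≤ 1; the stated number of rounds provably suffices for every run of A that returns.
def Pre_strip_dowm (v : List (String × List Int)) (taken : List Int) : Prop :=
  ∀ p ∈ (pvRun (2 * (v.map (fun p => p.2.length)).sum + v.length + 4) (v, taken)).1,
    p.2.length ≤ 1

instance (v : List (String × List Int)) (taken : List Int) : Decidable (Pre_strip_dowm v taken) := by
  unfold Pre_strip_dowm; infer_instance

def pvWitness_strip_dowm : (List (String × List Int)) × List Int :=
  ([("a", [1]), ("b", [1, 2])], [])

def Spec_strip_dowm (v : List (String × List Int)) (taken : List Int) (out : List (String × List Int)) : Prop := out = strip_dowm_alt v taken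
instance (v : List (String × List Int)) (taken : List Int) (out : List (String × List Int)) : Decidable (Spec_strip_dowm v taken out) := by unfold Spec_strip_dowm; infer_instance

-- ===== CLAIM (what is proved, stated in full; the proofs are below) =====
def Claim_equal_strip_dowm : Prop := ∀ (v : List (String × List Int)) (taken : List Int), Dom_strip_dowm v taken → Pre_strip_dowm v taken → Spec_strip_dowm v taken (strip_dowm v taken)

-- ===== LEMMAS AND PROOFS =====

-- the invariant tying an A-side entry to its B-side column under an event log E:
-- same candidate list, a valid cursor, and no candidate among the already-seen events
def CRel (E : List Int) (p : String × List Int) (q : List Int × Nat) : Prop :=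
  q.1 = p.2 ∧ q.2 ≤ E.length ∧ ∀ y ∈ q.1, y ∉ E.take q.2

theorem pv_take_append {E ext : List Int} {n : Nat} (h : n ≤ E.length) :
    (E ++ ext).take n = E.take n := by
  exact List.take_append_of_le_length h

theorem pv_crel_mono {E ext : List Int} {p : String × List Int} {q : List Int × Nat}
    (h : CRel E p q) : CRel (E ++ ext) p q := by
  obtain ⟨h1, h2, h3⟩ := h
  refine ⟨h1, by simp; omega, ?_⟩
  rw [pv_take_append h2]
  exact h3

theorem round_corr (w : List (String × List Int)) :
    ∀ (t events : List Int) (member : PySem.Set Int) (b : Bool) (cols : List (List Int × Nat)),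
    (∀ x : Int, x ∈ t ↔ x ∈ events) →
    (∀ x : Int, x ∈ member ↔ x ∈ events) →
    List.Forall₂ (CRel events) w cols →
    (∃ ext : List Int, (altRound cols events member b).2.1 = events ++ ext) ∧
    List.Forall₂ (CRel (altRound cols events member b).2.1)
      (stripPass w t).1 (altRound cols events member b).1 ∧
    (∀ x : Int, x ∈ (stripPass w t).2 ↔ x ∈ (altRound cols events member b).2.1) ∧
    (∀ x : Int, x ∈ (altRound cols events member b).2.2.1 ↔ x ∈ (altRound cols events member b).2.1) ∧
    (altRound cols events member b).2.2.2 = (b || (stripPass w t).1.any (fun x => 1 < x.2.length)) := by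
  induction w with
  | nil =>
    intro t events member b cols hE hM hF
    cases hF
    exact ⟨⟨[], by simp [altRound]⟩, List.Forall₂.nil, hE, hM, by simp [stripPass, altRound]⟩
  | cons p rest ih =>
    intro t events member b cols hE hM hF
    obtain ⟨key, val⟩ := p
    cases hF with
    | cons hpq htail =>
      rename_i q cols'
      obtain ⟨c, s⟩ := q
      obtain ⟨hq1, hq2, hq3⟩ := hpq
      simp only at hq1 hq2 hq3
      subst hq1
      by_cases hlen : c.length = 1
      · by_cases hmem : c.headI ∈ member
        · have hcont : PySem.Set.contains member c.headI = true := by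
            rw [PySem.Set.contains_iff]; exact hmem
          simp only [stripPass, altRound, hlen, if_pos, hcont]
          have hx : c.headI ∈ events := (hM _).mp hmem
          have hE' : ∀ x : Int, x ∈ t ++ [c.headI] ↔ x ∈ events := by
            intro x
            simp only [List.mem_append, List.mem_singleton]
            constructor
            · rintro (h | rfl)
              · exact (hE x).mp h
              · exact hx
            · intro h; exact Or.inl ((hE x).mpr h)
          obtain ⟨⟨ext, hext⟩, hF2, hE2, hM2, hP2⟩ :=
            ih (t ++ [c.headI]) events member b cols' hE' hM htail
          refine ⟨⟨ext, hext⟩, ?_, hE2, hM2, ?_⟩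
          · refine List.Forall₂.cons ?_ hF2
            rw [hext]
            exact pv_crel_mono ⟨rfl, hq2, hq3⟩
          · rw [hP2]
            have : ¬ (1 < c.length) := by omega
            simp [this]
        · have hcont : PySem.Set.contains member c.headI = false := by
            rw [← Bool.not_eq_true]
            intro hc
            rw [PySem.Set.contains_iff] at hc
            exact hmem hc
          simp only [stripPass, altRound, hlen, if_pos, hcont, Bool.false_eq_true, if_false]
          have hE' : ∀ x : Int, x ∈ t ++ [c.headI] ↔ x ∈ events ++ [c.headI] := by
            intro x
            simp only [List.mem_append, List.mem_singleton]
            exact or_congr_left (hE x)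
          have hM' : ∀ x : Int, x ∈ PySem.Set.add member c.headI ↔ x ∈ events ++ [c.headI] := by
            intro x
            rw [PySem.Set.mem_add member c.headI x]
            simp only [List.mem_append, List.mem_singleton]
            exact or_congr_left (hM x)
          have htail' : List.Forall₂ (CRel (events ++ [c.headI])) rest cols' :=
            List.Forall₂.imp (fun _ _ h => pv_crel_mono h) htail
          obtain ⟨⟨ext, hext⟩, hF2, hE2, hM2, hP2⟩ :=
            ih (t ++ [c.headI]) (events ++ [c.headI]) (PySem.Set.add member c.headI)
              b cols' hE' hM' htail'
          refine ⟨⟨[c.headI] ++ ext, by rw [hext, List.append_assoc]⟩, ?_, hE2, hM2, ?_⟩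
          · refine List.Forall₂.cons ?_ hF2
            rw [hext, List.append_assoc]
            exact pv_crel_mono ⟨rfl, hq2, hq3⟩
          · rw [hP2]
            have : ¬ (1 < c.length) := by omega
            simp [this]
      · -- multi-valued column: A filters by t, B filters by the unseen events
        have hj : c.filter (fun y => !(t.contains y)) =
            (if s < events.length then c.filter (fun y => !((events.drop s).contains y)) else c) := by
          by_cases hs : s < events.length
          · rw [if_pos hs]
            apply List.filter_congr
            intro y hy
            have hsplit : y ∈ events ↔ y ∈ events.drop s := by
              conv_lhs => rw [← List.take_append_drop s events]
              simp only [List.mem_append]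
              have := hq3 y hy
              tauto
            have : (t.contains y) = ((events.drop s).contains y) := by
              by_cases hyt : y ∈ t
              · have h1 : y ∈ events.drop s := hsplit.mp ((hE y).mp hyt)
                simp [hyt, h1]
              · have h1 : y ∉ events.drop s := fun h =>
                  hyt ((hE y).mpr (hsplit.mpr h))
                simp [hyt, h1]
            rw [this]
          · rw [if_neg hs]
            apply List.filter_eq_self.mpr
            intro y hy
            have hsl : s = events.length := by omega
            have : y ∉ events := by
              have := hq3 y hy
              rwa [hsl, List.take_of_length_le (le_refl _)] at this
            have : y ∉ t := fun h => this ((hE y).mp h)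
            simp [this]
        simp only [stripPass, altRound, hlen, if_neg, not_false_iff]
        obtain ⟨⟨ext, hext⟩, hF2, hE2, hM2, hP2⟩ :=
          ih t events member
            (b || decide (1 < (if s < events.length then
              c.filter (fun y => !((events.drop s).contains y)) else c).length))
            cols' hE hM htail
        have hs' : (if s < events.length then events.length else s) = events.length := by
          split <;> omega
        refine ⟨⟨ext, hext⟩, ?_, hE2, hM2, ?_⟩
        · refine List.Forall₂.cons ?_ hF2
          refine ⟨hj.symm, ?_, ?_⟩
          · simp only [hs', hext]
            simp
          · simp only [hs', hext]
            rw [List.take_left]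
            intro y hy
            have : y ∈ c.filter (fun z => !(t.contains z)) := by rw [hj]; exact hy
            have hyt : y ∉ t := by
              have := List.of_mem_filter this
              intro h
              simp [h] at this
            exact fun h => hyt ((hE y).mpr h)
        · rw [hP2, List.any_cons]
          simp only [Bool.or_assoc, hj]

-- keys are preserved by a pass
theorem stripPass_map_fst (w : List (String × List Int)) (t : List Int) :
    (stripPass w t).1.map Prod.fst = w.map Prod.fst := by
  induction w generalizing t with
  | nil => simp [stripPass]
  | cons a rest ih =>
    obtain ⟨k, val⟩ := a
    by_cases h : val.length = 1 <;> simp [stripPass, h, ih]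

theorem pv_zip_eq (w : List (String × List Int)) :
    (w.map Prod.fst).zip (w.map Prod.snd) = w := by
  induction w with
  | nil => rfl
  | cons a rest ih => simp [ih]

theorem pv_forall₂_snd {E : List Int} {w : List (String × List Int)} {cols : List (List Int × Nat)}
    (h : List.Forall₂ (CRel E) w cols) : cols.map Prod.fst = w.map Prod.snd := by
  induction h with
  | nil => rfl
  | cons hr _ ih => simp [ih, hr.1]

theorem go_corr (fuel : Nat) :
    ∀ (w : List (String × List Int)) (t events : List Int) (member : PySem.Set Int)
      (cols : List (List Int × Nat)),
    (∀ x : Int, x ∈ t ↔ x ∈ events) →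
    (∀ x : Int, x ∈ member ↔ x ∈ events) →
    List.Forall₂ (CRel events) w cols →
    (w.map Prod.fst).zip (altGo fuel cols events member) = stripGo fuel w t := by
  induction fuel with
  | zero =>
    intro w t events member cols _ _ hF
    simp only [stripGo, altGo]
    rw [pv_forall₂_snd hF, pv_zip_eq]
  | succ fuel ih =>
    intro w t events member cols hE hM hF
    obtain ⟨⟨ext, hext⟩, hF2, hE2, hM2, hP2⟩ := round_corr w t events member false cols hE hM hF
    simp only [stripGo, altGo, hP2, Bool.false_or]
    cases h : (stripPass w t).1.any (fun x => 1 < x.2.length) with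
    | true =>
      simp only [if_true]
      rw [← stripPass_map_fst w t]
      exact ih (stripPass w t).1 (stripPass w t).2 _ _ _ hE2 hM2 hF2
    | false =>
      simp only [Bool.false_eq_true, if_false]
      rw [pv_forall₂_snd hF2, ← stripPass_map_fst w t, pv_zip_eq]

theorem strip_total_eq (v : List (String × List Int)) (taken : List Int) :
    strip_dowm v taken = strip_dowm_alt v taken := by
  unfold strip_dowm strip_dowm_alt
  refine (go_corr _ v taken (PySem.List.dedup taken) (PySem.Set.ofList (PySem.List.dedup taken))
    (v.map (fun p => (p.2, 0))) ?_ ?_ ?_).symm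
  · intro x; exact (PySem.List.mem_dedup taken x).symm
  · intro x; exact PySem.Set.mem_ofList (PySem.List.dedup taken) x
  · induction v with
    | nil => exact List.Forall₂.nil
    | cons p rest ih =>
      exact List.Forall₂.cons ⟨rfl, Nat.zero_le _, by simp⟩ ih

-- ===== VERDICT (by name: the statement is the Claim_ definition above) =====
theorem strip_dowm_spec : Claim_equal_strip_dowm := by
  intro v taken _ _
  unfold Spec_strip_dowm
  exact strip_total_eq v taken
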